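-- pv_equiv track=rewrite | github.com/hawful70/leet-code-for-fun | daily/809.Expressive-words.py | _is_stretchy
-- ===== SOURCE A (Python) =====
-- def _is_stretchy(s: str, w: str) -> bool:
--     if len(s) < len(w):
--         return False
--
--     i = j = 0
--     n, m = len(s), len(w)
--     while i < n and j < m:
--         if s[i] != w[j]:
--             return False
--
--         count_s = 1
--         while i + 1 < n and s[i + 1] == s[i]:
--             count_s += 1
--             i += 1
--
--         count_w = 1
--         while j + 1 < m and w[j + 1] == w[j]:
--             count_w += 1
--             j += 1
--
--         # If the group in s is less than 3, counts must match exactly.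
--         if count_s < 3 and count_s != count_w:
--             return False
--         # If the group in s is 3 or more, the word group cannot exceed it.
--         if count_s >= 3 and count_w > count_s:
--             return False
--
--         i += 1
--         j += 1
--
--     return i == n and j == m
-- ===== SOURCE B (Python) =====
-- def _rle(x):
--     """Run-length encode x into a list of (char, count) pairs, one pass."""
--     runs = []
--     prev = ''
--     cnt = 0
--     for c in x:
--         if cnt > 0 and c == prev:
--             cnt += 1
--         else:
--             if cnt > 0:
--                 runs.append((prev, cnt))
--             prev = c
--             cnt = 1
--     if cnt > 0:
--         runs.append((prev, cnt))
--     return runs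
--
--
-- def _is_stretchy(s: str, w: str) -> bool:
--     gs = _rle(s)
--     gw = _rle(w)
--     if len(gs) != len(gw):
--         return False
--     return all(
--         not (cs_ch != cw_ch or (cs < 3 and cs != cw) or (cs >= 3 and cw > cs))
--         for (cs_ch, cs), (cw_ch, cw) in zip(gs, gw)
--     )
-- ===== Notes on version B (the rewrite author's own statement) =====
-- stated objective: simpler
-- what changed: Replaces the interleaved two-pointer index walk (with nested inner while loops over both strings) by run-length encoding each string once and then comparing the two group lists pairwise with zip/all; the redundant len(s)<len(w) guard is dropped since the group constraints already force it.
import Mathlib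
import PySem

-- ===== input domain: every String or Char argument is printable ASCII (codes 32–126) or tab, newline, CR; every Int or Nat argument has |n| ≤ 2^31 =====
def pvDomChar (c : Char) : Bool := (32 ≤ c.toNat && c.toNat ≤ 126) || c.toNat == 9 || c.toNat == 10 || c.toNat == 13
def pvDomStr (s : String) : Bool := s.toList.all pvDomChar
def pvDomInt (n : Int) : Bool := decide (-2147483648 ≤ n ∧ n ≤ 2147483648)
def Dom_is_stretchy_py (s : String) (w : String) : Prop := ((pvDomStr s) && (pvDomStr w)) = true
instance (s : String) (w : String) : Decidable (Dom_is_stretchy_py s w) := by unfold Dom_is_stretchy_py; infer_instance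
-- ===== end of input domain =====

-- B replaces A's interleaved two-pointer walk by run-length encoding each string once and
-- comparing the group lists pairwise (objective: simpler; same asymptotic cost).

-- ===== PORT A =====
-- inner while: `while i+1 < n and s[i+1] == s[i]` counts the rest of the current run;
-- here the suffix after position i is the list, and the comparison char is the run head
-- (equal to s[i] throughout the run, so this is the same count).
def runA (c : Char) : List Char → Nat
  | [] => 0
  | x :: xs => if x = c then runA c xs + 1 else 0

-- the main while loop over indices i, j, represented by the remaining suffixes of s and w;
-- loop exit returns `i == n and j == m`.
def aLoop : List Char → List Char → Bool
  | [], w => w.isEmpty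
  | _ :: _, [] => false
  | c :: s', d :: w' =>
    if c ≠ d then false
    else
      let ks := runA c s'      -- count_s = ks + 1
      let kw := runA d w'      -- count_w = kw + 1
      if ks + 1 < 3 ∧ ks + 1 ≠ kw + 1 then false
      else if 3 ≤ ks + 1 ∧ kw + 1 > ks + 1 then false
      else aLoop (s'.drop ks) (w'.drop kw)
termination_by s _ => s.length
decreasing_by simp

def is_stretchy_py (s : String) (w : String) : Bool :=
  if s.toList.length < w.toList.length then false
  else aLoop s.toList w.toList

-- ===== PORT B =====
-- the for-loop of _rle, state (runs, prev, cnt); Python's initial prev = '' is never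
-- compared while cnt = 0, so a dummy char stands in for it.
def rleLoop : List (Char × Nat) → Char → Nat → List Char → List (Char × Nat)
  | runs, prev, cnt, [] => if 0 < cnt then runs ++ [(prev, cnt)] else runs
  | runs, prev, cnt, c :: rest =>
      if 0 < cnt ∧ c = prev then rleLoop runs prev (cnt + 1) rest
      else rleLoop (if 0 < cnt then runs ++ [(prev, cnt)] else runs) c 1 rest

def rleB (l : List Char) : List (Char × Nat) := rleLoop [] ' ' 0 l

-- the predicate inside the all(...) generator
def pairOk : (Char × Nat) × (Char × Nat) → Bool
  | ((cs_ch, cs), (cw_ch, cw)) =>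
      !(decide (cs_ch ≠ cw_ch ∨ (cs < 3 ∧ cs ≠ cw) ∨ (3 ≤ cs ∧ cs < cw)))

def is_stretchy_py_alt (s : String) (w : String) : Bool :=
  let gs := rleB s.toList
  let gw := rleB w.toList
  if gs.length ≠ gw.length then false
  else (gs.zip gw).all pairOk

-- ===== PRECONDITION & SPEC =====
def Spec_is_stretchy_py (s : String) (w : String) (out : Bool) : Prop := out = is_stretchy_py_alt s w
instance (s : String) (w : String) (out : Bool) : Decidable (Spec_is_stretchy_py s w out) := by unfold Spec_is_stretchy_py; infer_instance

-- ===== CLAIM (what is proved, stated in full; the proofs are below) =====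
def Claim_equal_is_stretchy_py : Prop := ∀ (s : String) (w : String), Dom_is_stretchy_py s w → Spec_is_stretchy_py s w (is_stretchy_py s w)

-- ===== LEMMAS AND PROOFS =====

def cmpRuns : List (Char × Nat) → List (Char × Nat) → Bool
  | [], [] => true
  | g :: ts, h :: tw => pairOk (g, h) && cmpRuns ts tw
  | _, _ => false

lemma runA_le (c : Char) (l : List Char) : runA c l ≤ l.length := by
  induction l with
  | nil => simp [runA]
  | cons x xs ih =>
    by_cases h : x = c
    · simp [runA, h]; omega
    · simp [runA, h]

lemma rleLoop_append (l : List Char) : ∀ (a b : List (Char × Nat)) (p : Char) (k : Nat),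
    rleLoop (a ++ b) p k l = a ++ rleLoop b p k l := by
  induction l with
  | nil =>
    intro a b p k
    by_cases h : 0 < k <;> simp [rleLoop, h]
  | cons c rest ih =>
    intro a b p k
    by_cases hk : 0 < k <;> by_cases hc : c = p <;>
      simp [rleLoop, hk, hc, ih, List.append_assoc]

lemma rleLoop_run (l : List Char) : ∀ (runs : List (Char × Nat)) (p : Char) (k : Nat),
    rleLoop runs p (k + 1) l = runs ++ (p, k + 1 + runA p l) :: rleB (l.drop (runA p l)) := by
  induction l with
  | nil => intro runs p k; simp [rleLoop, rleB, runA]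
  | cons x xs ih =>
    intro runs p k
    by_cases h : x = p
    · subst h
      have hcond : (0 < k + 1 ∧ x = x) := ⟨Nat.succ_pos k, rfl⟩
      rw [rleLoop, if_pos hcond]
      simp only [runA]
      rw [ih runs x (k + 1)]
      simp [Nat.add_comm, Nat.add_left_comm]
    · have hcond : ¬(0 < k + 1 ∧ x = p) := by simp [h]
      simp only [rleLoop, if_neg hcond, if_pos (Nat.succ_pos k), runA, if_neg h]
      rw [show runs ++ [(p, k + 1)] = (runs ++ [(p, k + 1)]) ++ ([] : List (Char × Nat)) by simp,
        rleLoop_append xs (runs ++ [(p, k + 1)]) [] x 1]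
      simp [rleB, rleLoop]

lemma rleB_cons (c : Char) (l : List Char) :
    rleB (c :: l) = (c, 1 + runA c l) :: rleB (l.drop (runA c l)) := by
  have h : ¬(0 < 0 ∧ c = ' ') := by simp
  simp only [rleB, rleLoop, if_neg h, if_neg (lt_irrefl 0)]
  simpa [Nat.add_comm] using rleLoop_run l [] c 0

lemma aLoop_nil (w : List Char) : aLoop [] w = w.isEmpty := by
  rw [aLoop.eq_def]

lemma aLoop_cons_nil (c : Char) (s' : List Char) : aLoop (c :: s') [] = false := by
  rw [aLoop.eq_def]

lemma aLoop_cons_cons (c d : Char) (s' w' : List Char) :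
    aLoop (c :: s') (d :: w') =
      (if c ≠ d then false
       else if runA c s' + 1 < 3 ∧ runA c s' + 1 ≠ runA d w' + 1 then false
       else if 3 ≤ runA c s' + 1 ∧ runA d w' + 1 > runA c s' + 1 then false
       else aLoop (s'.drop (runA c s')) (w'.drop (runA d w'))) := by
  rw [aLoop.eq_def]

lemma cmpRuns_zip (gs : List (Char × Nat)) : ∀ gw : List (Char × Nat),
    cmpRuns gs gw = (decide (gs.length = gw.length) && (gs.zip gw).all pairOk) := by
  induction gs with
  | nil => intro gw; cases gw <;> simp [cmpRuns]
  | cons g ts ih =>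
    intro gw
    cases gw with
    | nil => simp [cmpRuns]
    | cons h tw =>
      simp only [cmpRuns, ih tw, List.zip_cons_cons, List.all_cons, List.length_cons]
      by_cases hp : pairOk (g, h) = true <;> by_cases hl : ts.length = tw.length <;>
        simp [hp, hl]

lemma alt_eq (s w : String) :
    is_stretchy_py_alt s w = cmpRuns (rleB s.toList) (rleB w.toList) := by
  rw [cmpRuns_zip]
  by_cases h : (rleB s.toList).length = (rleB w.toList).length <;>
    simp [is_stretchy_py_alt, h]

lemma aLoop_eq_cmp (n : Nat) : ∀ (s w : List Char), s.length ≤ n →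
    aLoop s w = cmpRuns (rleB s) (rleB w) := by
  induction n with
  | zero =>
    intro s w hs
    have hsnil : s = [] := by cases s <;> simp_all
    subst hsnil
    cases w with
    | nil => simp [aLoop_nil, rleB, rleLoop, cmpRuns]
    | cons d w' => rw [aLoop_nil, rleB_cons]; simp [rleB, rleLoop, cmpRuns]
  | succ n ih =>
    intro s w hs
    cases s with
    | nil =>
      cases w with
      | nil => simp [aLoop_nil, rleB, rleLoop, cmpRuns]
      | cons d w' => rw [aLoop_nil, rleB_cons]; simp [rleB, rleLoop, cmpRuns]
    | cons c s' =>
      cases w with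
      | nil => rw [aLoop_cons_nil, rleB_cons]; simp [rleB, rleLoop, cmpRuns]
      | cons d w' =>
        rw [aLoop_cons_cons, rleB_cons, rleB_cons]
        simp only [cmpRuns]
        by_cases hcd : c = d
        · subst hcd
          rw [if_neg (by simp : ¬(c ≠ c))]
          set ks := runA c s' with hks
          set kw := runA c w' with hkw
          by_cases h1 : ks + 1 < 3 ∧ ks + 1 ≠ kw + 1
          · have hp : pairOk ((c, 1 + ks), (c, 1 + kw)) = false := by
              simp only [pairOk]; simp; omega
            rw [if_pos h1, hp]; simp
          · by_cases h2 : 3 ≤ ks + 1 ∧ kw + 1 > ks + 1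
            · have hp : pairOk ((c, 1 + ks), (c, 1 + kw)) = false := by
                simp only [pairOk]; simp; omega
              rw [if_neg h1, if_pos h2, hp]; simp
            · have hp : pairOk ((c, 1 + ks), (c, 1 + kw)) = true := by
                simp only [pairOk]; simp; omega
              have hlen : (s'.drop ks).length ≤ n := by
                have := runA_le c s'
                simp at hs ⊢; omega
              rw [if_neg h1, if_neg h2, hp,
                ih (s'.drop ks) (w'.drop kw) hlen]
              simp
        · have hp : pairOk ((c, 1 + runA c s'), (d, 1 + runA d w')) = false := by
            simp only [pairOk]; simp [hcd]
          rw [if_pos (by simpa using hcd), hp]; simp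

lemma aLoop_length (n : Nat) : ∀ (s w : List Char), s.length ≤ n →
    aLoop s w = true → w.length ≤ s.length := by
  induction n with
  | zero =>
    intro s w hs h
    have hsnil : s = [] := by cases s <;> simp_all
    subst hsnil
    cases w with
    | nil => simp
    | cons d w' => rw [aLoop_nil] at h; simp at h
  | succ n ih =>
    intro s w hs h
    cases s with
    | nil =>
      cases w with
      | nil => simp
      | cons d w' => rw [aLoop_nil] at h; simp at h
    | cons c s' =>
      cases w with
      | nil => rw [aLoop_cons_nil] at h; simp at h
      | cons d w' =>
        rw [aLoop_cons_cons] at h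
        by_cases hcd : c ≠ d
        · rw [if_pos hcd] at h; simp at h
        · rw [if_neg hcd] at h
          set ks := runA c s' with hks
          set kw := runA d w' with hkw
          by_cases h1 : ks + 1 < 3 ∧ ks + 1 ≠ kw + 1
          · rw [if_pos h1] at h; simp at h
          · by_cases h2 : 3 ≤ ks + 1 ∧ kw + 1 > ks + 1
            · rw [if_neg h1, if_pos h2] at h; simp at h
            · rw [if_neg h1, if_neg h2] at h
              have hlen : (s'.drop ks).length ≤ n := by
                have := runA_le c s'
                simp at hs ⊢; omega
              have hrec := ih (s'.drop ks) (w'.drop kw) hlen h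
              have h3 := runA_le c s'
              have h4 := runA_le d w'
              simp at hrec ⊢
              omega

-- ===== VERDICT (by name: the statement is the Claim_ definition above) =====
theorem is_stretchy_py_spec : Claim_equal_is_stretchy_py := by
  intro s w _
  unfold Spec_is_stretchy_py is_stretchy_py
  rw [alt_eq, ← aLoop_eq_cmp s.toList.length s.toList w.toList (le_refl _)]
  by_cases h : s.toList.length < w.toList.length
  · rw [if_pos h]
    cases hA : aLoop s.toList w.toList with
    | false => rfl
    | true =>
      have := aLoop_length s.toList.length s.toList w.toList (le_refl _) hA
      omega
  · rw [if_neg h]
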